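-- pv_equiv track=rewrite | github.com/ayukyo/alltoolkit | Python/ngram_utils/mod.py | language_distance
-- ===== SOURCE A (Python) =====
-- from typing import List, Dict, Tuple, Optional, Union, Callable, Set
--
-- def language_distance(profile1: Dict[str, int], profile2: Dict[str, int]) -> int:
--     """
--     Calculate out-of-place distance between two N-gram profiles.
--
--     Used for language identification. Lower distance = more similar.
--
--     Args:
--         profile1: First N-gram profile (from ngram_profile)
--         profile2: Second N-gram profile
--
--     Returns:
--         Out-of-place distance (lower = more similar)
--
--     Examples:
--         >>> p1 = {'a': 1, 'b': 2}
--         >>> p2 = {'a': 1, 'b': 2}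
--         >>> language_distance(p1, p2)
--         0
--     """
--     max_rank = max(max(profile1.values(), default=0), max(profile2.values(), default=0))
--     max_distance = max_rank * len(profile1)
--
--     distance = 0
--     for ngram, rank in profile1.items():
--         if ngram in profile2:
--             distance += abs(rank - profile2[ngram])
--         else:
--             distance += max_distance
--
--     return distance
-- ===== SOURCE B (Python) =====
-- def language_distance(profile1, profile2):
--     max_rank = max(max(profile1.values(), default=0), max(profile2.values(), default=0))
--     max_distance = max_rank * len(profile1)
--     s1 = sorted(profile1.items(), key=lambda kv: kv[0])
--     s2 = sorted(profile2.items(), key=lambda kv: kv[0])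
--     distance = 0
--     i = j = 0
--     while i < len(s1):
--         if j == len(s2) or s1[i][0] < s2[j][0]:
--             distance += max_distance
--             i += 1
--         elif s2[j][0] < s1[i][0]:
--             j += 1
--         else:
--             distance += abs(s1[i][1] - s2[j][1])
--             i += 1
--             j += 1
--     return distance
-- ===== Notes on version B (the rewrite author's own statement) =====
-- stated objective: alternative
-- what changed: Replaces A's per-key dict-membership loop by a sort-and-merge scan: both profiles are sorted by key and a two-pointer merge adds |rank difference| on equal keys and max_distance when profile1's key is skipped, with no dict lookup in the loop.
import Mathlib
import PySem

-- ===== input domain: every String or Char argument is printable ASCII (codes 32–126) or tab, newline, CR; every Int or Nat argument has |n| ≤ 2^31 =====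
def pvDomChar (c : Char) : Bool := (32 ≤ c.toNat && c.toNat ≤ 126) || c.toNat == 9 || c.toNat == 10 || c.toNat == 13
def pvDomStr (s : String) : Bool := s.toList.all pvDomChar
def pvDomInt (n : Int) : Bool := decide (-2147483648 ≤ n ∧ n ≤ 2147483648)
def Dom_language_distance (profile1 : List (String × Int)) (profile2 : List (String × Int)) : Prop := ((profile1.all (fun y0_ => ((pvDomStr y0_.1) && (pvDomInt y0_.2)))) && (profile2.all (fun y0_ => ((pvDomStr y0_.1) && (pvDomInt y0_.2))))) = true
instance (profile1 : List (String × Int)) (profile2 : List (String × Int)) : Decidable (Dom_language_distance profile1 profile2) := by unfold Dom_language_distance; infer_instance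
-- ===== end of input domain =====

-- B replaces A's dict-membership loop by a sort-and-merge two-pointer scan over both
-- profiles sorted by key (alternative algorithm; no lookup structure in the loop).
-- ===== PORT A =====
def language_distance (profile1 : List (String × Int)) (profile2 : List (String × Int)) : Int :=
  let maxRank : Int := max ((PySem.List.max? (profile1.map Prod.snd) (fun v => v)).getD 0)
                           ((PySem.List.max? (profile2.map Prod.snd) (fun v => v)).getD 0)
  let maxDistance : Int := maxRank * profile1.length
  profile1.foldl (fun distance p =>
    match (PySem.Dict.mk profile2).get? p.1 with
    | some r2 => distance + |p.2 - r2|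
    | none => distance + maxDistance) 0

-- ===== PORT B =====
-- B's while loop over the two sorted lists (indices i, j become the unconsumed suffixes)
def ldMerge (maxD : Int) : List (String × Int) → List (String × Int) → Int
  | [], _ => 0
  | _ :: s1, [] => maxD + ldMerge maxD s1 []
  | p :: s1, q :: s2 =>
      if p.1 < q.1 then maxD + ldMerge maxD s1 (q :: s2)
      else if q.1 < p.1 then ldMerge maxD (p :: s1) s2
      else |p.2 - q.2| + ldMerge maxD s1 s2
  termination_by s1 s2 => s1.length + s2.length

def language_distance_alt (profile1 : List (String × Int)) (profile2 : List (String × Int)) : Int :=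
  let maxRank : Int := max ((PySem.List.max? (profile1.map Prod.snd) (fun v => v)).getD 0)
                           ((PySem.List.max? (profile2.map Prod.snd) (fun v => v)).getD 0)
  let maxDistance : Int := maxRank * profile1.length
  ldMerge maxDistance (PySem.List.sorted profile1 (fun kv => kv.1) false)
                      (PySem.List.sorted profile2 (fun kv => kv.1) false)

-- ===== PRECONDITION & SPEC =====
-- Pre_ excludes association lists with duplicate keys: they are an ambiguous encoding of a
-- Python dict (a real dict, the actual argument type of A and B, has unique keys).
def Pre_language_distance (profile1 : List (String × Int)) (profile2 : List (String × Int)) : Prop :=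
  (profile1.map Prod.fst).Nodup ∧ (profile2.map Prod.fst).Nodup
instance (profile1 : List (String × Int)) (profile2 : List (String × Int)) : Decidable (Pre_language_distance profile1 profile2) := by unfold Pre_language_distance; infer_instance
def pvWitness_language_distance : (List (String × Int)) × (List (String × Int)) :=
  ([("a", 1), ("b", 2)], [("a", 1), ("c", 5)])
def Spec_language_distance (profile1 : List (String × Int)) (profile2 : List (String × Int)) (out : Int) : Prop := out = language_distance_alt profile1 profile2
instance (profile1 : List (String × Int)) (profile2 : List (String × Int)) (out : Int) : Decidable (Spec_language_distance profile1 profile2 out) := by unfold Spec_language_distance; infer_instance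

-- ===== CLAIM (what is proved, stated in full; the proofs are below) =====
def Claim_equal_language_distance : Prop := ∀ (profile1 : List (String × Int)) (profile2 : List (String × Int)), Dom_language_distance profile1 profile2 → Pre_language_distance profile1 profile2 → Spec_language_distance profile1 profile2 (language_distance profile1 profile2)

-- ===== LEMMAS AND PROOFS =====

-- first-match lookup in an assoc list, the semantics of (PySem.Dict.mk l).get?
theorem get?_mk_none_of_forall_lt (l : List (String × Int)) (k : String)
    (h : ∀ p ∈ l, k < p.1) : (PySem.Dict.mk l).get? k = none := by
  induction l with
  | nil => rfl
  | cons hd tl ih =>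
    rw [show (PySem.Dict.mk (hd :: tl)) = PySem.Dict.mk ((hd.1, hd.2) :: tl) by simp,
      PySem.Dict.get?_mk_cons, if_neg]
    · exact ih (fun p hp => h p (List.mem_cons_of_mem _ hp))
    · have := h hd (List.mem_cons_self)
      simp only [beq_iff_eq]
      exact fun he => absurd he.symm (ne_of_lt this)

-- merge over key-strictly-sorted lists computes A's per-key branching sum
theorem ldMerge_eq_sum (maxD : Int) (s1 s2 : List (String × Int))
    (h1 : s1.Pairwise (fun a b => a.1 < b.1)) (h2 : s2.Pairwise (fun a b => a.1 < b.1)) :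
    ldMerge maxD s1 s2
      = (s1.map (fun p => match (PySem.Dict.mk s2).get? p.1 with
          | some r2 => |p.2 - r2| | none => maxD)).sum := by
  fun_induction ldMerge maxD s1 s2 with
  | case1 s2 => simp
  | case2 p s1 ih =>
    simp only [List.pairwise_cons] at h1
    simp [ih h1.2 h2, show (PySem.Dict.mk ([] : List (String × Int))).get? p.1 = none from rfl]
  | case3 p s1 q s2 hlt ih =>
    simp only [List.pairwise_cons] at h1
    have hnone : (PySem.Dict.mk (q :: s2)).get? p.1 = none := by
      apply get?_mk_none_of_forall_lt
      intro r hr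
      rcases List.mem_cons.mp hr with h | h
      · exact h ▸ hlt
      · exact lt_trans hlt ((List.pairwise_cons.mp h2).1 r h)
    simp [ih h1.2 h2, hnone]
  | case4 p s1 q s2 hnlt hlt ih =>
    simp only [List.pairwise_cons] at h2
    rw [ih h1 h2.2]
    apply congrArg
    apply List.map_congr_left
    intro r hr
    have hrq : q.1 < r.1 := by
      rcases List.mem_cons.mp hr with h | h
      · exact h ▸ hlt
      · exact lt_trans hlt ((List.pairwise_cons.mp h1).1 r h)
    rw [show (PySem.Dict.mk (q :: s2)) = PySem.Dict.mk ((q.1, q.2) :: s2) by simp,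
      PySem.Dict.get?_mk_cons, if_neg]
    simp only [beq_iff_eq]
    exact fun he => absurd he (ne_of_lt hrq)
  | case5 p s1 q s2 hnlt hnlt' ih =>
    have heq : p.1 = q.1 := le_antisymm (not_lt.mp hnlt') (not_lt.mp hnlt)
    simp only [List.pairwise_cons] at h1 h2
    rw [ih h1.2 h2.2]
    have hhd : (PySem.Dict.mk (q :: s2)).get? p.1 = some q.2 := by
      rw [show (PySem.Dict.mk (q :: s2)) = PySem.Dict.mk ((q.1, q.2) :: s2) by simp,
        PySem.Dict.get?_mk_cons, if_pos (by simp [heq])]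
    have htl : (s1.map (fun p => match (PySem.Dict.mk (q :: s2)).get? p.1 with
          | some r2 => |p.2 - r2| | none => maxD)).sum
        = (s1.map (fun p => match (PySem.Dict.mk s2).get? p.1 with
          | some r2 => |p.2 - r2| | none => maxD)).sum := by
      apply congrArg
      apply List.map_congr_left
      intro r hr
      rw [show (PySem.Dict.mk (q :: s2)) = PySem.Dict.mk ((q.1, q.2) :: s2) by simp,
        PySem.Dict.get?_mk_cons, if_neg]
      simp only [beq_iff_eq]
      have : p.1 < r.1 := h1.1 r hr
      exact fun he => absurd he (ne_of_lt (heq ▸ this))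
    simp [List.map_cons, List.sum_cons, hhd, htl]

-- with nodup keys, first-match lookup is invariant under permutation of the list
theorem get?_mk_mem_iff (l : List (String × Int)) (hnd : (l.map Prod.fst).Nodup)
    (k : String) (v : Int) : (PySem.Dict.mk l).get? k = some v ↔ (k, v) ∈ l := by
  induction l with
  | nil => simp [show (PySem.Dict.mk ([] : List (String × Int))).get? k = none from rfl]
  | cons hd tl ih =>
    simp only [List.map_cons, List.nodup_cons] at hnd
    rw [show (PySem.Dict.mk (hd :: tl)) = PySem.Dict.mk ((hd.1, hd.2) :: tl) by simp,
      PySem.Dict.get?_mk_cons]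
    by_cases h : hd.1 = k
    · subst h
      rw [if_pos (by simp)]
      constructor
      · rintro ⟨rfl⟩; exact List.mem_cons_self
      · intro hm
        rcases List.mem_cons.mp hm with h | h
        · rw [← h]
        · exact absurd (List.mem_map_of_mem (f := Prod.fst) h) hnd.1
    · rw [if_neg (by simpa using h), ih hnd.2]
      constructor
      · exact List.mem_cons_of_mem _
      · intro hm
        rcases List.mem_cons.mp hm with hh | hh
        · exact absurd (congrArg Prod.fst hh).symm h
        · exact hh

theorem get?_mk_perm (l l' : List (String × Int)) (hp : l.Perm l')
    (hnd : (l.map Prod.fst).Nodup) (k : String) :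
    (PySem.Dict.mk l).get? k = (PySem.Dict.mk l').get? k := by
  have hnd' : (l'.map Prod.fst).Nodup := (hp.map Prod.fst).nodup_iff.mp hnd
  cases h : (PySem.Dict.mk l').get? k with
  | some v => exact (get?_mk_mem_iff l hnd k v).mpr (hp.mem_iff.mpr ((get?_mk_mem_iff l' hnd' k v).mp h))
  | none =>
    cases h' : (PySem.Dict.mk l).get? k with
    | none => rfl
    | some v =>
      rw [(get?_mk_mem_iff l' hnd' k v).mpr (hp.mem_iff.mp ((get?_mk_mem_iff l hnd k v).mp h'))] at h
      exact absurd h (by simp)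

-- ===== VERDICT (by name: the statement is the Claim_ definition above) =====
theorem language_distance_spec : Claim_equal_language_distance := by
  intro p1 p2 _ hpre
  rcases hpre with ⟨hnd1, hnd2⟩
  unfold Spec_language_distance language_distance language_distance_alt
  simp only []
  set maxD : Int := (max ((PySem.List.max? (p1.map Prod.snd) (fun v => v)).getD 0)
      ((PySem.List.max? (p2.map Prod.snd) (fun v => v)).getD 0)) * p1.length with hmaxD
  set s1 := PySem.List.sorted p1 (fun kv => kv.1) false with hs1
  set s2 := PySem.List.sorted p2 (fun kv => kv.1) false with hs2
  have hperm1 : s1.Perm p1 := PySem.List.sorted_perm p1 _ false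
  have hperm2 : s2.Perm p2 := PySem.List.sorted_perm p2 _ false
  have hnds1 : (s1.map Prod.fst).Nodup := ((hperm1.map Prod.fst).nodup_iff).mpr hnd1
  have hnds2 : (s2.map Prod.fst).Nodup := ((hperm2.map Prod.fst).nodup_iff).mpr hnd2
  have hsorted1 : s1.Pairwise (fun a b => a.1 < b.1) := by
    have hle : s1.Pairwise (fun a b => a.1 ≤ b.1) := PySem.List.sorted_pairwise p1 _
    have hne : s1.Pairwise (fun a b => a.1 ≠ b.1) := List.pairwise_map.mp hnds1
    exact (hle.and hne).imp (fun h => lt_of_le_of_ne h.1 h.2)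
  have hsorted2 : s2.Pairwise (fun a b => a.1 < b.1) := by
    have hle : s2.Pairwise (fun a b => a.1 ≤ b.1) := PySem.List.sorted_pairwise p2 _
    have hne : s2.Pairwise (fun a b => a.1 ≠ b.1) := List.pairwise_map.mp hnds2
    exact (hle.and hne).imp (fun h => lt_of_le_of_ne h.1 h.2)
  rw [ldMerge_eq_sum maxD s1 s2 hsorted1 hsorted2]
  -- A's fold as a mapped sum
  have hfold : p1.foldl (fun distance p =>
      match (PySem.Dict.mk p2).get? p.1 with
      | some r2 => distance + |p.2 - r2|
      | none => distance + maxD) 0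
      = (p1.map (fun p => match (PySem.Dict.mk p2).get? p.1 with
          | some r2 => |p.2 - r2| | none => maxD)).sum := by
    have : (fun (distance : Int) (p : String × Int) =>
        match (PySem.Dict.mk p2).get? p.1 with
        | some r2 => distance + |p.2 - r2|
        | none => distance + maxD)
        = (fun (distance : Int) (p : String × Int) => distance +
            (match (PySem.Dict.mk p2).get? p.1 with
             | some r2 => |p.2 - r2| | none => maxD)) := by
      funext a p; cases (PySem.Dict.mk p2).get? p.1 <;> simp
    rw [this, PySem.List.foldl_add]; simp
  rw [hfold]
  -- same lookup table (s2 ~ p2, nodup keys), same multiset of summands (s1 ~ p1)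
  have hlk : ∀ p : String × Int, (PySem.Dict.mk s2).get? p.1 = (PySem.Dict.mk p2).get? p.1 :=
    fun p => get?_mk_perm s2 p2 hperm2 hnds2 p.1
  have : (s1.map (fun p => match (PySem.Dict.mk s2).get? p.1 with
        | some r2 => |p.2 - r2| | none => maxD))
      = (s1.map (fun p => match (PySem.Dict.mk p2).get? p.1 with
        | some r2 => |p.2 - r2| | none => maxD)) :=
    List.map_congr_left (fun p _ => by rw [hlk p])
  rw [this, (hperm1.map _).sum_eq]
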